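-- pv_equiv track=rewrite | github.com/Erarindubey/Data-Engineering-and-Analyst-projects | Flat dataset/P3.py | property_category
-- ===== SOURCE A (Python) =====
-- def property_category(a):
--     result=[]
--     parts=a.split()
--     for part in parts:
--        if 'for' in part.lower():
--            break
--        if 'BHK' not in part and not part.isdigit():
--            result.append(part)
--     return ' '.join(result).strip()
-- ===== SOURCE B (Python) =====
-- def property_category(a):
--     kept = []
--     for p in reversed(a.split()):
--         if 'for' in p.lower():
--             kept = []
--         elif 'BHK' not in p and not p.isdigit():
--             kept.append(p)
--     return ' '.join(reversed(kept)).strip()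
-- ===== Notes on version B (the rewrite author's own statement) =====
-- stated objective: alternative
-- what changed: Scans the tokens right-to-left over the WHOLE list with a reset-on-sentinel accumulator (hitting a 'for' token clears everything gathered so far) and reverses at the end, instead of A's left-to-right loop that breaks at the sentinel.
import Mathlib
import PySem

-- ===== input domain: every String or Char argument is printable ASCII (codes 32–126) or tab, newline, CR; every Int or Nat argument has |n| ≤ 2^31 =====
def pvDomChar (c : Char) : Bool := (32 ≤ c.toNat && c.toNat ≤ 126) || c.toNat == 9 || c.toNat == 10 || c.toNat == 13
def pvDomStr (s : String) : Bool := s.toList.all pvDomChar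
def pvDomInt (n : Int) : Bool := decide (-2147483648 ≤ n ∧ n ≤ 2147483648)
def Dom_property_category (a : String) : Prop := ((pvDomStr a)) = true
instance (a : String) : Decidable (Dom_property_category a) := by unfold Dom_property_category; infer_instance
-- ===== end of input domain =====

-- B scans the tokens right-to-left with a reset-on-'for' accumulator instead of A's left-to-right break loop; same value, objective: alternative.

-- ===== PORT A =====
-- A's loop: break on 'for' substring, else conditionally append.
def pvLoopA : List String → List String → List String
  | [], acc => acc
  | p :: rest, acc =>
    if PySem.Str.isIn "for" (PySem.Str.lower p) then acc
    else if !(PySem.Str.isIn "BHK" p) && !(PySem.Str.strIsdigit p) then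
      pvLoopA rest (acc ++ [p])
    else
      pvLoopA rest acc

def property_category (a : String) : String :=
  PySem.Str.strip (PySem.Str.join " " (pvLoopA (PySem.Str.split₀ a) []))

-- ===== PORT B =====
-- B's loop body: reset on 'for', else conditionally append (applied over the reversed token list).
def pvStepB (kept : List String) (p : String) : List String :=
  if PySem.Str.isIn "for" (PySem.Str.lower p) then []
  else if !(PySem.Str.isIn "BHK" p) && !(PySem.Str.strIsdigit p) then kept ++ [p]
  else kept

def property_category_alt (a : String) : String :=
  let kept := (PySem.Str.split₀ a).reverse.foldl pvStepB []
  PySem.Str.strip (PySem.Str.join " " kept.reverse)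

-- ===== PRECONDITION & SPEC =====
def Spec_property_category (a : String) (out : String) : Prop := out = property_category_alt a
instance (a : String) (out : String) : Decidable (Spec_property_category a out) := by unfold Spec_property_category; infer_instance

-- ===== CLAIM (what is proved, stated in full; the proofs are below) =====
def Claim_equal_property_category : Prop := ∀ (a : String), Dom_property_category a → Spec_property_category a (property_category a)

-- ===== LEMMAS AND PROOFS =====
-- reference result: filtered prefix of the tokens before the first 'for' token
def pvSpecList : List String → List String
  | [] => []
  | p :: rest =>
    if PySem.Str.isIn "for" (PySem.Str.lower p) then []
    else if !(PySem.Str.isIn "BHK" p) && !(PySem.Str.strIsdigit p) then p :: pvSpecList rest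
    else pvSpecList rest

theorem pvLoopA_eq (parts acc : List String) :
    pvLoopA parts acc = acc ++ pvSpecList parts := by
  induction parts generalizing acc with
  | nil => simp [pvLoopA, pvSpecList]
  | cons p rest ih =>
    simp only [pvLoopA, pvSpecList]
    split_ifs with h1 h2
    · simp
    · rw [ih]; simp
    · rw [ih]

theorem pvFoldB_eq (parts : List String) :
    parts.reverse.foldl pvStepB [] = (pvSpecList parts).reverse := by
  induction parts with
  | nil => simp [pvSpecList]
  | cons p rest ih =>
    simp only [List.reverse_cons, List.foldl_append, List.foldl_cons, List.foldl_nil, ih,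
      pvSpecList, pvStepB]
    split_ifs with h1 h2 <;> simp

-- ===== VERDICT (by name: the statement is the Claim_ definition above) =====
theorem property_category_spec : Claim_equal_property_category := by
  intro a _
  unfold Spec_property_category property_category property_category_alt
  rw [pvLoopA_eq, pvFoldB_eq]
  simp
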